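-- pv_equiv track=rewrite | github.com/pypi-data/pypi-mirror-383 | packages/mariqt/mariqt-1.0.1-py2.py3-none-any.whl/mariqt/navigation.py | getPositionsInTimeRange
-- ===== SOURCE A (Python) =====
-- def getPositionsInTimeRange(time_points:list,t_min:int,t_max:int,t_startIndex:int):
-- 	""" returns list of position within time range. Start search at t_start. Postions Must be ordered by time """
-- 	time_points_InRange = []
--
-- 	# forward
-- 	last_index = t_startIndex
-- 	for i in range(t_startIndex,len(time_points)):
-- 		if time_points[i] > t_min and time_points[i] < t_max:
-- 			time_points_InRange.append(time_points[i])
-- 			last_index = i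
-- 		if time_points[i] >= t_max:
-- 			break
-- 	# backward
-- 	for i in range(t_startIndex -1,-1,-1):
-- 		if time_points[i] > t_min and  time_points[i] < t_max:
-- 			time_points_InRange.append(time_points[i])
-- 			last_index = i
-- 		if time_points[i] <= t_min:
-- 			break
-- 	if len(time_points_InRange) > 1:
-- 		time_points_InRange.sort()
--
-- 	return time_points_InRange, last_index
-- ===== SOURCE B (Python) =====
-- def _takewhile(pred, xs):
--     out = []
--     for x in xs:
--         if not pred(x):
--             break
--         out.append(x)
--     return out
--
--
-- def getPositionsInTimeRange(time_points, t_min, t_max, t_startIndex):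
--     """Segment view: take-while slices around the start index instead of indexed scans with breaks."""
--     fseg = _takewhile(lambda x: x < t_max, time_points[t_startIndex:])
--     bseg = _takewhile(lambda x: x > t_min, time_points[:t_startIndex][::-1])
--     res = sorted([x for x in fseg if x > t_min] + [x for x in bseg if x < t_max])
--     fidx = [t_startIndex + i for i, x in enumerate(fseg) if x > t_min]
--     bidx = [t_startIndex - 1 - i for i, x in enumerate(bseg) if x < t_max]
--     last_index = t_startIndex
--     if fidx:
--         last_index = fidx[-1]
--     if bidx:
--         last_index = bidx[-1]
--     return res, last_index
-- ===== Notes on version B (the rewrite author's own statement) =====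
-- stated objective: alternative
-- what changed: A's two indexed scans with in-loop collection, break statements and a mutated last_index accumulator are replaced by a segment view: take-while over the slices around the start index, comprehension filters for the values, and the last_index derived from enumerated index lists.
-- outside the precondition, e.g. on getPositionsInTimeRange([1, 2, 3], 0, 10, -1): A returns ([1, 2, 3, 3], 2), B returns ([1, 2, 3], -3); on getPositionsInTimeRange([1, 2, 3], 0, 10, 5): A raises IndexError, B returns ([1, 2, 3], 2)
import Mathlib
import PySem

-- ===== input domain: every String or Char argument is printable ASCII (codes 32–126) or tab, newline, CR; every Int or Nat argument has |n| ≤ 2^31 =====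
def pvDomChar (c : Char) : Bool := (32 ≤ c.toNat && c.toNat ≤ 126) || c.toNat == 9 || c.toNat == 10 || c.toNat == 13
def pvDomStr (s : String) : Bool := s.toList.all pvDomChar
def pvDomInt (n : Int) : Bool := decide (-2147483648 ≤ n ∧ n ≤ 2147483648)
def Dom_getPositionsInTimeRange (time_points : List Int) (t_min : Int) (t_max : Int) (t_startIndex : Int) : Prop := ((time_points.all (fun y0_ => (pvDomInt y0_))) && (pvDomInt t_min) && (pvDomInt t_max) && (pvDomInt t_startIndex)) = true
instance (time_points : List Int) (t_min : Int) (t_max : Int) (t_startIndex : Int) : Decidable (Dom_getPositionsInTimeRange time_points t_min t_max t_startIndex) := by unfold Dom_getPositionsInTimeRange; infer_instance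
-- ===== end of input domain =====

-- B replaces A's indexed scans with breaks by take-while segments around the start index
-- plus filters and enumerated index lists; same cost, different decomposition.

-- ===== PORT A =====
-- forward loop of A: indices i, fetch time_points[i], collect/track last_index, break at x >= t_max
def pvFwdA (tp : List Int) (t_min t_max : Int) : List Int → List Int → Int → (List Int × Int)
  | [], acc, last => (acc, last)
  | i :: rest, acc, last =>
    let x := PySem.List.pyGetD tp i 0
    let acc' := if t_min < x ∧ x < t_max then acc ++ [x] else acc
    let last' := if t_min < x ∧ x < t_max then i else last
    if t_max ≤ x then (acc', last') else pvFwdA tp t_min t_max rest acc' last'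

-- backward loop of A: break at x <= t_min
def pvBwdA (tp : List Int) (t_min t_max : Int) : List Int → List Int → Int → (List Int × Int)
  | [], acc, last => (acc, last)
  | i :: rest, acc, last =>
    let x := PySem.List.pyGetD tp i 0
    let acc' := if t_min < x ∧ x < t_max then acc ++ [x] else acc
    let last' := if t_min < x ∧ x < t_max then i else last
    if x ≤ t_min then (acc', last') else pvBwdA tp t_min t_max rest acc' last'

def getPositionsInTimeRange (time_points : List Int) (t_min : Int) (t_max : Int) (t_startIndex : Int) : List Int × Int :=
  let st1 := pvFwdA time_points t_min t_max
      (PySem.List.pyRange t_startIndex (PySem.List.len time_points) 1) [] t_startIndex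
  let st2 := pvBwdA time_points t_min t_max
      (PySem.List.pyRange (t_startIndex - 1) (-1) (-1)) st1.1 st1.2
  (if 1 < st2.1.length then PySem.List.sorted st2.1 id false else st2.1, st2.2)

-- ===== PORT B =====
-- _takewhile of Source B
def pvTakeWhileB (p : Int → Bool) : List Int → List Int
  | [] => []
  | x :: xs => if p x then x :: pvTakeWhileB p xs else []

-- time_points[:s][::-1] is the reversed prefix (PySem.List.slice?_none_none_neg_one)
def getPositionsInTimeRange_alt (time_points : List Int) (t_min : Int) (t_max : Int) (t_startIndex : Int) : List Int × Int :=
  let fseg := pvTakeWhileB (fun x => x < t_max) (PySem.List.slice time_points (some t_startIndex) none)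
  let bseg := pvTakeWhileB (fun x => x > t_min) (PySem.List.slice time_points none (some t_startIndex)).reverse
  let res := PySem.List.sorted
      (fseg.filter (fun x => x > t_min) ++ bseg.filter (fun x => x < t_max)) id false
  let fidx := (PySem.List.enumerate fseg 0).filterMap
      (fun p => if p.2 > t_min then some (t_startIndex + p.1) else none)
  let bidx := (PySem.List.enumerate bseg 0).filterMap
      (fun p => if p.2 < t_max then some (t_startIndex - 1 - p.1) else none)
  let last_index := t_startIndex
  let last_index := fidx.getLastD last_index
  let last_index := bidx.getLastD last_index
  (res, last_index)

-- ===== PRECONDITION & SPEC =====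
-- Pre_ excludes t_startIndex > len(time_points), where A raises IndexError in the backward
-- loop, and negative t_startIndex, where A's negative-index wraparound scans elements twice
-- in an accidental order that no caller of a start *index* would specify.
def Pre_getPositionsInTimeRange (time_points : List Int) (t_min : Int) (t_max : Int) (t_startIndex : Int) : Prop :=
  0 ≤ t_startIndex ∧ t_startIndex ≤ time_points.length
instance (time_points : List Int) (t_min : Int) (t_max : Int) (t_startIndex : Int) : Decidable (Pre_getPositionsInTimeRange time_points t_min t_max t_startIndex) := by unfold Pre_getPositionsInTimeRange; infer_instance

def pvWitness_getPositionsInTimeRange : List Int × Int × Int × Int := ([1, 2, 3], 0, 10, 1)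

def Spec_getPositionsInTimeRange (time_points : List Int) (t_min : Int) (t_max : Int) (t_startIndex : Int) (out : List Int × Int) : Prop := out = getPositionsInTimeRange_alt time_points t_min t_max t_startIndex
instance (time_points : List Int) (t_min : Int) (t_max : Int) (t_startIndex : Int) (out : List Int × Int) : Decidable (Spec_getPositionsInTimeRange time_points t_min t_max t_startIndex out) := by unfold Spec_getPositionsInTimeRange; infer_instance

-- ===== CLAIM (what is proved, stated in full; the proofs are below) =====
def Claim_equal_getPositionsInTimeRange : Prop := ∀ (time_points : List Int) (t_min : Int) (t_max : Int) (t_startIndex : Int), Dom_getPositionsInTimeRange time_points t_min t_max t_startIndex → Pre_getPositionsInTimeRange time_points t_min t_max t_startIndex → Spec_getPositionsInTimeRange time_points t_min t_max t_startIndex (getPositionsInTimeRange time_points t_min t_max t_startIndex)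

-- ===== LEMMAS AND PROOFS =====

-- index list of the collected forward elements, counting up from j
def pvColF (t_min j : Int) : List Int → List Int
  | [] => []
  | x :: xs => if t_min < x then j :: pvColF t_min (j + 1) xs else pvColF t_min (j + 1) xs

-- index list of the collected backward elements, counting down from j
def pvColB (t_max j : Int) : List Int → List Int
  | [] => []
  | x :: xs => if x < t_max then j :: pvColB t_max (j - 1) xs else pvColB t_max (j - 1) xs

lemma pvColF_enum (t_min : Int) : ∀ (xs : List Int) (j c : Int),
    (PySem.List.enumerate xs j).filterMap
      (fun p => if p.2 > t_min then some (c + p.1) else none)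
    = pvColF t_min (c + j) xs := by
  intro xs
  induction xs with
  | nil => intro j c; simp [PySem.List.enumerate_nil, pvColF]
  | cons x xs ih =>
    intro j c
    simp only [PySem.List.enumerate_cons, List.filterMap_cons, pvColF]
    have h := ih (j + 1) c
    by_cases hx : t_min < x
    · simp [hx, gt_iff_lt, h, add_assoc]
    · simp [hx, gt_iff_lt, h, add_assoc]

lemma pvColB_enum (t_max : Int) : ∀ (xs : List Int) (j c : Int),
    (PySem.List.enumerate xs j).filterMap
      (fun p => if p.2 < t_max then some (c - p.1) else none)
    = pvColB t_max (c - j) xs := by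
  intro xs
  induction xs with
  | nil => intro j c; simp [PySem.List.enumerate_nil, pvColB]
  | cons x xs ih =>
    intro j c
    simp only [PySem.List.enumerate_cons, List.filterMap_cons, pvColB]
    have h := ih (j + 1) c
    by_cases hx : x < t_max
    · simp [hx, h, sub_sub]
    · simp [hx, h, sub_sub]

-- the forward loop of A over range(j, len(tp)) is take-while/filter on the suffix tp[j:]
lemma pvFwdA_eq (tp : List Int) (t_min t_max : Int) : ∀ (suffix : List Int) (j : Int)
    (acc : List Int) (last : Int), 0 ≤ j → tp.drop j.toNat = suffix →
    pvFwdA tp t_min t_max (PySem.List.pyRange j (PySem.List.len tp) 1) acc last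
    = (acc ++ (pvTakeWhileB (fun x => x < t_max) suffix).filter (fun x => x > t_min),
       (pvColF t_min j (pvTakeWhileB (fun x => x < t_max) suffix)).getLastD last) := by
  intro suffix
  induction suffix with
  | nil =>
    intro j acc last hj hdrop
    have hlen : tp.length ≤ j.toNat := List.drop_eq_nil_iff.mp hdrop
    have : (PySem.List.len tp) ≤ j := by
      simp only [PySem.List.len_eq]; omega
    rw [PySem.List.pyRange_one_eq_nil this]
    simp [pvFwdA, pvTakeWhileB, pvColF]
  | cons x rest ih =>
    intro j acc last hj hdrop
    have hjlt : j.toNat < tp.length := by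
      by_contra h
      rw [List.drop_eq_nil_iff.mpr (by omega)] at hdrop
      simp at hdrop
    have hx : tp[j.toNat]? = some x := by
      have h2 := List.getElem?_drop (xs := tp) (i := j.toNat) (j := 0)
      rw [hdrop] at h2
      simpa using h2.symm
    have hjlt' : j < PySem.List.len tp := by simp only [PySem.List.len_eq]; omega
    rw [PySem.List.pyRange_one_cons hjlt']
    have hget : PySem.List.pyGetD tp j 0 = x := by
      rw [PySem.List.pyGetD_eq_getElem tp 0 hj (by omega)]
      obtain ⟨hlt2, hxe⟩ := List.getElem?_eq_some_iff.mp hx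
      exact hxe
    have hdrop' : tp.drop (j + 1).toNat = rest := by
      have h1 : (j + 1).toNat = j.toNat + 1 := by omega
      rw [h1, ← List.drop_drop, hdrop]
      simp
    simp only [pvFwdA, hget]
    by_cases hbr : t_max ≤ x
    · have hcol : ¬ (t_min < x ∧ x < t_max) := by omega
      simp only [if_neg hcol, if_pos hbr]
      have : pvTakeWhileB (fun x => x < t_max) (x :: rest) = [] := by
        simp [pvTakeWhileB, show ¬ x < t_max by omega]
      rw [this]
      simp [pvColF]
    · have hxlt : x < t_max := by omega
      have hTW : pvTakeWhileB (fun x => x < t_max) (x :: rest)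
          = x :: pvTakeWhileB (fun x => x < t_max) rest := by
        simp [pvTakeWhileB, hxlt]
      simp only [if_neg hbr]
      rw [ih (j + 1) _ _ (by omega) hdrop', hTW]
      by_cases hc : t_min < x
      · have hcol : t_min < x ∧ x < t_max := ⟨hc, hxlt⟩
        simp only [if_pos hcol, Prod.mk.injEq]
        constructor
        · simp [hc]
        · simp only [pvColF, if_pos hc, List.getLastD_cons]
      · have hcol : ¬ (t_min < x ∧ x < t_max) := by tauto
        simp only [if_neg hcol, Prod.mk.injEq]
        constructor
        · simp [hc]
        · simp only [pvColF, if_neg hc]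

-- the backward loop of A over range(k-1, -1, -1) is take-while/filter on reversed prefix
lemma pvBwdA_eq (tp : List Int) (t_min t_max : Int) : ∀ (rpre : List Int)
    (acc : List Int) (last : Int), (tp.take rpre.length).reverse = rpre →
    pvBwdA tp t_min t_max (PySem.List.pyRange ((rpre.length : Int) - 1) (-1) (-1)) acc last
    = (acc ++ (pvTakeWhileB (fun x => x > t_min) rpre).filter (fun x => x < t_max),
       (pvColB t_max ((rpre.length : Int) - 1) (pvTakeWhileB (fun x => x > t_min) rpre)).getLastD last) := by
  intro rpre
  induction rpre with
  | nil =>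
    intro acc last _
    rw [PySem.List.pyRange_neg_one_eq_nil (by simp)]
    simp [pvBwdA, pvTakeWhileB, pvColB]
  | cons x rest ih =>
    intro acc last htake
    have hk : (x :: rest).length = rest.length + 1 := by simp
    have htake' : tp.take (rest.length + 1) = rest.reverse ++ [x] := by
      have := congrArg List.reverse htake
      simpa using this
    have hklen : rest.length + 1 ≤ tp.length := by
      have := congrArg List.length htake'
      simp at this
      omega
    have hx : tp[rest.length]? = some x := by
      have h2 : (tp.take (rest.length + 1))[rest.length]? = some x := by
        rw [htake']
        simp
      rw [List.getElem?_take] at h2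
      simpa using h2
    have hrest : (tp.take rest.length).reverse = rest := by
      have h1 : tp.take rest.length = (tp.take (rest.length + 1)).take rest.length := by
        rw [List.take_take]; congr 1; omega
      rw [h1, htake', List.take_append_of_le_length (by simp),
        List.take_of_length_le (by simp), List.reverse_reverse]
    have hlen1 : ((x :: rest).length : Int) - 1 = (rest.length : Int) := by
      simp only [List.length_cons]; omega
    rw [hlen1, PySem.List.pyRange_neg_one_cons (by omega)]
    have hget : PySem.List.pyGetD tp (rest.length : Int) 0 = x := by
      rw [PySem.List.pyGetD_natCast]
      simp [List.getD_eq_getElem?_getD, hx]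
    simp only [pvBwdA, hget]
    by_cases hbr : x ≤ t_min
    · have hcol : ¬ (t_min < x ∧ x < t_max) := by omega
      simp only [if_neg hcol, if_pos hbr]
      have : pvTakeWhileB (fun x => x > t_min) (x :: rest) = [] := by
        simp [pvTakeWhileB, show ¬ x > t_min by omega]
      rw [this]
      simp [pvColB]
    · have hxgt : x > t_min := by omega
      have hTW : pvTakeWhileB (fun x => x > t_min) (x :: rest)
          = x :: pvTakeWhileB (fun x => x > t_min) rest := by
        simp [pvTakeWhileB, hxgt]
      simp only [if_neg hbr]
      rw [ih _ _ hrest, hTW]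
      by_cases hc : x < t_max
      · have hcol : t_min < x ∧ x < t_max := ⟨hxgt, hc⟩
        simp only [if_pos hcol, Prod.mk.injEq]
        constructor
        · simp [hc]
        · simp only [pvColB, if_pos hc, List.getLastD_cons]
      · have hcol : ¬ (t_min < x ∧ x < t_max) := by tauto
        simp only [if_neg hcol, Prod.mk.injEq]
        constructor
        · simp [hc]
        · simp only [pvColB, if_neg hc]

lemma pvSorted_short (xs : List Int) (h : ¬ 1 < xs.length) :
    PySem.List.sorted xs id false = xs := by
  apply PySem.List.sorted_eq_self_of_pairwise
  cases xs with
  | nil => exact List.Pairwise.nil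
  | cons a ys =>
    cases ys with
    | nil => exact List.pairwise_singleton _ _
    | cons b zs => simp at h

-- ===== VERDICT (by name: the statement is the Claim_ definition above) =====
theorem getPositionsInTimeRange_spec : Claim_equal_getPositionsInTimeRange := by
  intro tp t_min t_max s _ hpre
  obtain ⟨hs0, hslen⟩ := hpre
  unfold Spec_getPositionsInTimeRange getPositionsInTimeRange getPositionsInTimeRange_alt
  have hfwd := pvFwdA_eq tp t_min t_max (tp.drop s.toNat) s [] s hs0 rfl
  have hrlen : ((tp.take s.toNat).reverse).length = s.toNat := by
    simp; omega
  have hbwd := pvBwdA_eq tp t_min t_max ((tp.take s.toNat).reverse)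
      ((pvTakeWhileB (fun x => x < t_max) (tp.drop s.toNat)).filter (fun x => x > t_min))
      ((pvColF t_min s (pvTakeWhileB (fun x => x < t_max) (tp.drop s.toNat))).getLastD s)
      (by rw [hrlen])
  rw [hrlen] at hbwd
  have hcast : (s.toNat : Int) = s := by omega
  rw [hcast] at hbwd
  have hsliceF : PySem.List.slice tp (some s) none = tp.drop s.toNat :=
    PySem.List.slice_from tp hs0
  have hsliceB : PySem.List.slice tp none (some s) = tp.take s.toNat :=
    PySem.List.slice_to tp hs0
  simp only [hfwd, hbwd, hsliceF, hsliceB, List.nil_append]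
  rw [pvColF_enum t_min _ 0 s, pvColB_enum t_max _ 0 (s - 1)]
  simp only [add_zero, sub_zero]
  by_cases hlen : 1 < ((pvTakeWhileB (fun x => x < t_max) (tp.drop s.toNat)).filter (fun x => x > t_min)
      ++ (pvTakeWhileB (fun x => x > t_min) ((tp.take s.toNat).reverse)).filter (fun x => x < t_max)).length
  · simp only [if_pos hlen]
  · simp only [if_neg hlen, pvSorted_short _ hlen]

-- excluded examples for the Pre_ comment: A on ([1,2,3],0,10,-1) returns ([1,2,3,3],2) by
-- wraparound while B returns ([1,2,3],-3); A on ([1,2,3],0,10,5) raises IndexError.
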